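-- pv_equiv track=rewrite | github.com/qodeinvestments/Qode-Data-Fetcher | qode_fetcher/database.py | search_tables_by_pattern
-- ===== SOURCE A (Python) =====
-- from typing import List, Dict, Optional, Tuple
--
-- def search_tables_by_pattern(all_tables: List[str], exchange: str = "",
--                            instrument: str = "", underlying: str = "", limit: int = 50) -> List[str]:
--     """
--     Search tables by specific pattern components
--     """
--     filtered_tables = all_tables
--
--     if exchange:
--         exchange_upper = exchange.upper()
--         filtered_tables = [t for t in filtered_tables if t.upper().startswith(exchange_upper)]
--
--     if instrument:
--         instrument_upper = instrument.upper()
--         filtered_tables = [t for t in filtered_tables if instrument_upper in t.upper()]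
--
--     if underlying:
--         underlying_upper = underlying.upper()
--         filtered_tables = [t for t in filtered_tables if underlying_upper in t.upper()]
--
--     return filtered_tables[:limit]
-- ===== SOURCE B (Python) =====
-- def search_tables_by_pattern(all_tables, exchange="", instrument="", underlying="", limit=50):
--     ex = exchange.upper()
--     ins = instrument.upper()
--     und = underlying.upper()
--     result = []
--     for t in all_tables:
--         tu = t.upper()
--         if (not exchange or tu.startswith(ex)) and \
--            (not instrument or ins in tu) and \
--            (not underlying or und in tu):
--             result.append(t)
--     return result[:limit]
-- ===== Notes on version B (the rewrite author's own statement) =====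
-- stated objective: simpler
-- what changed: Replaces three sequential filter comprehensions (each re-uppercasing every surviving table) with one pass that uppercases each table once and tests the three conditions together, then slices.
import Mathlib
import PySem

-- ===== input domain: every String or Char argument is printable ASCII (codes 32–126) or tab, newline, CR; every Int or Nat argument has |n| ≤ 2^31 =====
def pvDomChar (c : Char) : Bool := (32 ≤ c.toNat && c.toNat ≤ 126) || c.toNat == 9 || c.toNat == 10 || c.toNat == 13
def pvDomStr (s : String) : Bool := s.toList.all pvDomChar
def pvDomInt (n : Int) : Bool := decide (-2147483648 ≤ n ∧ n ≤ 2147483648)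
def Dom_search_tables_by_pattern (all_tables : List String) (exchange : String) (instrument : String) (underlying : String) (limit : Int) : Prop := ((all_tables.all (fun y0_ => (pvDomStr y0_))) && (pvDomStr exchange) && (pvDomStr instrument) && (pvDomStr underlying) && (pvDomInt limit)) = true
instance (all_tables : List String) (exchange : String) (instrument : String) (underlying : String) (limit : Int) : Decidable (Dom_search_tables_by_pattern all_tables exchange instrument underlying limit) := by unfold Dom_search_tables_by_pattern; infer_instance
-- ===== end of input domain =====

-- B: one combined-predicate pass (each table uppercased once) instead of three sequential filter comprehensions; same results.


-- ===== PORT A =====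
def search_tables_by_pattern (all_tables : List String) (exchange : String) (instrument : String) (underlying : String) (limit : Int) : List String :=
  let filtered_tables := all_tables
  let filtered_tables :=
    if exchange ≠ "" then
      let exchange_upper := PySem.Str.upper exchange
      filtered_tables.filter (fun t => PySem.Str.startswith (PySem.Str.upper t) exchange_upper)
    else filtered_tables
  let filtered_tables :=
    if instrument ≠ "" then
      let instrument_upper := PySem.Str.upper instrument
      filtered_tables.filter (fun t => PySem.Str.isIn instrument_upper (PySem.Str.upper t))
    else filtered_tables
  let filtered_tables :=
    if underlying ≠ "" then
      let underlying_upper := PySem.Str.upper underlying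
      filtered_tables.filter (fun t => PySem.Str.isIn underlying_upper (PySem.Str.upper t))
    else filtered_tables
  PySem.List.slice filtered_tables none (some limit)

-- ===== PORT B =====
def search_tables_by_pattern_alt (all_tables : List String) (exchange : String) (instrument : String) (underlying : String) (limit : Int) : List String :=
  let ex := PySem.Str.upper exchange
  let ins := PySem.Str.upper instrument
  let und := PySem.Str.upper underlying
  let result := all_tables.foldl (fun acc t =>
    let tu := PySem.Str.upper t
    if (exchange == "" || PySem.Str.startswith tu ex)
        && (instrument == "" || PySem.Str.isIn ins tu)
        && (underlying == "" || PySem.Str.isIn und tu)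
    then acc ++ [t] else acc) []
  PySem.List.slice result none (some limit)

-- ===== PRECONDITION & SPEC =====
def Spec_search_tables_by_pattern (all_tables : List String) (exchange : String) (instrument : String) (underlying : String) (limit : Int) (out : List String) : Prop := out = search_tables_by_pattern_alt all_tables exchange instrument underlying limit
instance (all_tables : List String) (exchange : String) (instrument : String) (underlying : String) (limit : Int) (out : List String) : Decidable (Spec_search_tables_by_pattern all_tables exchange instrument underlying limit out) := by unfold Spec_search_tables_by_pattern; infer_instance

-- ===== CLAIM (what is proved, stated in full; the proofs are below) =====
def Claim_equal_search_tables_by_pattern : Prop := ∀ (all_tables : List String) (exchange : String) (instrument : String) (underlying : String) (limit : Int), Dom_search_tables_by_pattern all_tables exchange instrument underlying limit → Spec_search_tables_by_pattern all_tables exchange instrument underlying limit (search_tables_by_pattern all_tables exchange instrument underlying limit)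

-- ===== LEMMAS AND PROOFS =====

-- ===== VERDICT (by name: the statement is the Claim_ definition above) =====
theorem search_tables_by_pattern_spec : Claim_equal_search_tables_by_pattern := by
  intro all_tables exchange instrument underlying limit _
  unfold Spec_search_tables_by_pattern search_tables_by_pattern search_tables_by_pattern_alt
  dsimp only
  rw [PySem.List.foldl_append_if_eq_filter]
  congr 1
  by_cases he : exchange = "" <;> by_cases hi : instrument = "" <;> by_cases hu : underlying = "" <;>
    simp [he, hi, hu, beq_eq_decide, List.filter_filter, Bool.and_comm, Bool.and_left_comm]
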